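-- pv_equiv track=rewrite | github.com/christianmw24/PyGasTRGI18 | trgiX16.py | getgsdp
-- ===== SOURCE A (Python) =====
-- gs0 = 0
--
-- gs25 = {10:10, 12:15, 14:20, 15:25, 17:30, 18:35, 19:40, 20:45, 21:50}
--
-- gs4 = {17:10, 20:15, 23:20, 25:25, 27:30, 29:35, 31:40, 33:45, 34:50}
--
-- gs6 = {25:10, 30:15, 34:20, 38:25, 41:30, 44:35, 47:40, 50:45, 51:50}
--
-- gs10 = {43:10, 50:15, 57:20, 63:25, 69:30, 74:35, 79:40, 83:45, 86:50}
--
-- gs16 = {68:10, 81:15, 92:20, 102:25, 110:30, 119:35, 126:40, 134:45, 138:50}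
--
-- def getgsdp(selectqnb):
--     selectqnb = int(selectqnb)
--     if selectqnb <= 17:
--         gstab = gs25
--     elif selectqnb > 17 and selectqnb < 28:
--         gstab = gs4
--     elif selectqnb > 27 and selectqnb < 42:
--         gstab = gs6
--     elif selectqnb > 41 and selectqnb < 69:
--         gstab = gs10
--     elif selectqnb > 68 and selectqnb < 111:
--         gstab = gs16
--     else:
--         gstab = gs0
--     if gstab == 0:
--         gsdp = 0
--     else:
--         if selectqnb in gstab:
--             gsdp = gstab[selectqnb]
--         else:
--             while selectqnb not in gstab:
--                 selectqnb = selectqnb + 1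
--             gsdp = gstab[selectqnb]
--     return gsdp
-- ===== SOURCE B (Python) =====
-- # B: table-driven — pick the (upper-bound, items) branch, then linearly scan the
-- # sorted key list for the first key >= n, instead of probing integers one by one.
--
-- _GS25 = [(10, 10), (12, 15), (14, 20), (15, 25), (17, 30), (18, 35), (19, 40), (20, 45), (21, 50)]
-- _GS4 = [(17, 10), (20, 15), (23, 20), (25, 25), (27, 30), (29, 35), (31, 40), (33, 45), (34, 50)]
-- _GS6 = [(25, 10), (30, 15), (34, 20), (38, 25), (41, 30), (44, 35), (47, 40), (50, 45), (51, 50)]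
-- _GS10 = [(43, 10), (50, 15), (57, 20), (63, 25), (69, 30), (74, 35), (79, 40), (83, 45), (86, 50)]
-- _GS16 = [(68, 10), (81, 15), (92, 20), (102, 25), (110, 30), (119, 35), (126, 40), (134, 45), (138, 50)]
--
-- _BRANCHES = [(17, _GS25), (27, _GS4), (41, _GS6), (68, _GS10), (110, _GS16)]
--
--
-- def getgsdp(selectqnb):
--     n = int(selectqnb)
--     for hi, items in _BRANCHES:
--         if n <= hi:
--             for k, v in items:
--                 if k >= n:
--                     return v
--             return 0
--     return 0
-- ===== Notes on version B (the rewrite author's own statement) =====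
-- stated objective: faster
-- what changed: Replaced the increment-until-key-membership while loop (which probes every integer from n upward, unbounded for very negative n) with a single linear scan over a sorted (bound, table) branch list and the table's key list for the first key >= n.
import Mathlib
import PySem

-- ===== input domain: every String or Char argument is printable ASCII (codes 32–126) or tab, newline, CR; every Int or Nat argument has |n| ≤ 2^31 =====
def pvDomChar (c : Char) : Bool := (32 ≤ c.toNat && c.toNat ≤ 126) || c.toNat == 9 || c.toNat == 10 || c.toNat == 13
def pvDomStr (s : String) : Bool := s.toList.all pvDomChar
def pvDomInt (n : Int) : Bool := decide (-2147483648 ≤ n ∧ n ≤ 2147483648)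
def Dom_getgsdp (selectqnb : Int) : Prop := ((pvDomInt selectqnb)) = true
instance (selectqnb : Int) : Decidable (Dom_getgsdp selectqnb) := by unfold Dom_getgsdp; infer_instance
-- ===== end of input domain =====

-- B replaces A's increment-until-membership while loop by a direct first-key-≥-n scan over the
-- branch's sorted key list (objective: faster; bounded scan instead of per-integer probing).

-- ===== PORT A =====
def gs25 : PySem.Dict Int Int :=
  PySem.Dict.mk [(10,10),(12,15),(14,20),(15,25),(17,30),(18,35),(19,40),(20,45),(21,50)]
def gs4 : PySem.Dict Int Int :=
  PySem.Dict.mk [(17,10),(20,15),(23,20),(25,25),(27,30),(29,35),(31,40),(33,45),(34,50)]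
def gs6 : PySem.Dict Int Int :=
  PySem.Dict.mk [(25,10),(30,15),(34,20),(38,25),(41,30),(44,35),(47,40),(50,45),(51,50)]
def gs10 : PySem.Dict Int Int :=
  PySem.Dict.mk [(43,10),(50,15),(57,20),(63,25),(69,30),(74,35),(79,40),(83,45),(86,50)]
def gs16 : PySem.Dict Int Int :=
  PySem.Dict.mk [(68,10),(81,15),(92,20),(102,25),(110,30),(119,35),(126,40),(134,45),(138,50)]

-- A's 'if selectqnb in gstab … else while selectqnb not in gstab: selectqnb += 1; gstab[selectqnb]'.
-- The fuel (distance to the selected table's largest key, fixed at the call site) only makes the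
-- recursion total: in A every reachable call has a key ≥ n, so fuel never runs out.
def probeA (tab : PySem.Dict Int Int) : Nat → Int → Int
  | 0, _ => 0
  | fuel + 1, n =>
    match tab.get? n with
    | some v => v
    | none => probeA tab fuel (n + 1)

def getgsdp (selectqnb : Int) : Int :=
  if selectqnb ≤ 17 then probeA gs25 ((21 - selectqnb).toNat + 1) selectqnb
  else if selectqnb > 17 ∧ selectqnb < 28 then probeA gs4 ((34 - selectqnb).toNat + 1) selectqnb
  else if selectqnb > 27 ∧ selectqnb < 42 then probeA gs6 ((51 - selectqnb).toNat + 1) selectqnb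
  else if selectqnb > 41 ∧ selectqnb < 69 then probeA gs10 ((86 - selectqnb).toNat + 1) selectqnb
  else if selectqnb > 68 ∧ selectqnb < 111 then probeA gs16 ((138 - selectqnb).toNat + 1) selectqnb
  else 0

-- ===== PORT B =====
-- Source B's inner 'for k, v in items: if k >= n: return v' / trailing 'return 0'
def scanCeil : List (Int × Int) → Int → Int
  | [], _ => 0
  | (k, v) :: t, n => if n ≤ k then v else scanCeil t n

def pvGS25 : List (Int × Int) := [(10,10),(12,15),(14,20),(15,25),(17,30),(18,35),(19,40),(20,45),(21,50)]
def pvGS4 : List (Int × Int) := [(17,10),(20,15),(23,20),(25,25),(27,30),(29,35),(31,40),(33,45),(34,50)]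
def pvGS6 : List (Int × Int) := [(25,10),(30,15),(34,20),(38,25),(41,30),(44,35),(47,40),(50,45),(51,50)]
def pvGS10 : List (Int × Int) := [(43,10),(50,15),(57,20),(63,25),(69,30),(74,35),(79,40),(83,45),(86,50)]
def pvGS16 : List (Int × Int) := [(68,10),(81,15),(92,20),(102,25),(110,30),(119,35),(126,40),(134,45),(138,50)]

def pvBranches : List (Int × List (Int × Int)) :=
  [(17, pvGS25), (27, pvGS4), (41, pvGS6), (68, pvGS10), (110, pvGS16)]

-- Source B's outer 'for hi, items in _BRANCHES: if n <= hi: …' / trailing 'return 0'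
def pickScan : List (Int × List (Int × Int)) → Int → Int
  | [], _ => 0
  | (hi, items) :: t, n => if n ≤ hi then scanCeil items n else pickScan t n

def getgsdp_alt (selectqnb : Int) : Int :=
  pickScan pvBranches selectqnb

-- ===== PRECONDITION & SPEC =====
def Spec_getgsdp (selectqnb : Int) (out : Int) : Prop := out = getgsdp_alt selectqnb
instance (selectqnb : Int) (out : Int) : Decidable (Spec_getgsdp selectqnb out) := by unfold Spec_getgsdp; infer_instance

-- ===== CLAIM (what is proved, stated in full; the proofs are below) =====
def Claim_equal_getgsdp : Prop := ∀ (selectqnb : Int), Dom_getgsdp selectqnb → Spec_getgsdp selectqnb (getgsdp selectqnb)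

-- ===== LEMMAS AND PROOFS =====

-- below gs25's smallest key 10, A's while loop just climbs; no key is hit until 10
lemma gs25_get?_none_of_lt (n : Int) (h : n < 10) : gs25.get? n = none := by
  simp only [gs25]
  simp only [PySem.Dict.get?_mk_cons]
  have h10 : ((10 : Int) == n) = false := by simp; omega
  have h12 : ((12 : Int) == n) = false := by simp; omega
  have h14 : ((14 : Int) == n) = false := by simp; omega
  have h15 : ((15 : Int) == n) = false := by simp; omega
  have h17 : ((17 : Int) == n) = false := by simp; omega
  have h18 : ((18 : Int) == n) = false := by simp; omega
  have h19 : ((19 : Int) == n) = false := by simp; omega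
  have h20 : ((20 : Int) == n) = false := by simp; omega
  have h21 : ((21 : Int) == n) = false := by simp; omega
  simp [h10, h12, h14, h15, h17, h18, h19, h20, h21, PySem.Dict.get?]

lemma probeA_gs25_low : ∀ (k fuel : Nat), k < fuel → probeA gs25 fuel (10 - (k : Int)) = 10
  | 0, fuel + 1, _ => by
      simp only [Nat.cast_zero, sub_zero]
      rw [probeA, show gs25.get? 10 = some 10 from by decide]
  | k + 1, fuel + 1, h => by
      rw [probeA]
      have hn : (10 - (((k + 1 : Nat)) : Int)) < 10 := by push_cast; omega
      rw [gs25_get?_none_of_lt _ hn]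
      rw [show 10 - (((k + 1 : Nat)) : Int) + 1 = 10 - (k : Int) by push_cast; ring]
      exact probeA_gs25_low k fuel (by omega)

lemma probeA_gs25_le10 (n : Int) (h : n ≤ 10) : probeA gs25 ((21 - n).toNat + 1) n = 10 := by
  have he : n = 10 - ((10 - n).toNat : Int) := by omega
  rw [he]
  exact probeA_gs25_low (10 - n).toNat _ (by omega)

lemma alt_le10 (n : Int) (h : n ≤ 10) : getgsdp_alt n = 10 := by
  unfold getgsdp_alt pickScan pvBranches pvGS25
  have h17 : n ≤ 17 := by omega
  simp [pickScan, scanCeil, h, h17]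

-- ===== VERDICT (by name: the statement is the Claim_ definition above) =====
theorem getgsdp_spec : Claim_equal_getgsdp := by
  intro n _
  show getgsdp n = getgsdp_alt n
  by_cases h10 : n ≤ 10
  · rw [alt_le10 n h10]
    unfold getgsdp
    rw [if_pos (by omega : n ≤ 17)]
    exact probeA_gs25_le10 n h10
  · by_cases hhi : n ≥ 111
    · have hA : getgsdp n = 0 := by
        unfold getgsdp; split_ifs <;> omega
      have hB : getgsdp_alt n = 0 := by
        unfold getgsdp_alt pvBranches
        simp only [pickScan, scanCeil]; split_ifs <;> omega
      rw [hA, hB]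
    · have hlo : 11 ≤ n := by omega
      have hup : n ≤ 110 := by omega
      interval_cases n <;> decide
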